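-- pv_equiv track=rewrite | github.com/SchArthur/exo_pygame | convert.py | create_colors_dict
-- ===== SOURCE A (Python) =====
-- def create_colors_dict(pixelRGBHEXlist) -> dict:
--     special_char = ('&','{','#','(','[','-','|','`','_','@',')',']','=','+','}','$','*')
--     color_dict = {}
--     for pixelRGB in pixelRGBHEXlist:
--         if pixelRGB not in color_dict:
--             for i in range(0, len(special_char)):
--                 if special_char[i] not in color_dict.values():
--                     color_dict[pixelRGB] = special_char[i]
--                     break
--
--     return color_dict
-- ===== SOURCE B (Python) =====
-- def create_colors_dict(pixelRGBHEXlist) -> dict: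
--     special_char = ('&','{','#','(','[','-','|','`','_','@',')',']','=','+','}','$','*')
--     color_dict = {}
--     chars = iter(special_char)
--     for pixelRGB in pixelRGBHEXlist:
--         if pixelRGB not in color_dict:
--             c = next(chars, None)
--             if c is None:
--                 break
--             color_dict[pixelRGB] = c
--     return color_dict
-- ===== Notes on version B (the rewrite author's own statement) =====
-- stated objective: simpler
-- what changed: A's inner find-first-unused scan over color_dict.values() is replaced by a single pass consuming a sequential iterator over the character tuple (next per new color, break when exhausted), so no inner loop remains.
import Mathlib
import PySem

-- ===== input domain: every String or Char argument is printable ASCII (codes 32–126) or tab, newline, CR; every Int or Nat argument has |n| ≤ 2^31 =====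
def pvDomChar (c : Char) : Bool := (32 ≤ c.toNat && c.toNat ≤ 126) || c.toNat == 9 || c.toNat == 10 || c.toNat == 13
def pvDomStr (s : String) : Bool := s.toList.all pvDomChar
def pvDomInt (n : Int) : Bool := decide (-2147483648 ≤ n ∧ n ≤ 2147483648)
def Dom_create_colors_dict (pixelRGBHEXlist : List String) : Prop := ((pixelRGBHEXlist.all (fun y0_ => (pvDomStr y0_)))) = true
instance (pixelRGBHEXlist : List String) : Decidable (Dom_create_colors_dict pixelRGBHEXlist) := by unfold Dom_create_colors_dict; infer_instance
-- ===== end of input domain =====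

-- B replaces A's inner find-first-unused scan over color_dict.values() by a single pass that
-- consumes the special-character tuple sequentially via an iterator (break when exhausted);
-- objective: simpler.


-- ===== PORT A =====
-- the special_char tuple of A
def pvSpecial : List String :=
  ["&", "{", "#", "(", "[", "-", "|", "`", "_", "@", ")", "]", "=", "+", "}", "$", "*"]

-- inner loop: 'for i in range(0, len(special_char)): if special_char[i] not in color_dict.values():
--   color_dict[pixelRGB] = special_char[i]; break' — returns the character assigned (none = loop fell through)
def pvFindFree (vals : List String) : List Int → Option String
  | [] => none
  | i :: rest =>
      if vals.contains (PySem.List.pyGetD pvSpecial i "") then pvFindFree vals rest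
      else some (PySem.List.pyGetD pvSpecial i "")

-- outer loop body: 'if pixelRGB not in color_dict: <inner loop>'
def pvStepA (d : PySem.Dict String String) (pixelRGB : String) : PySem.Dict String String :=
  if d.contains pixelRGB then d
  else
    match pvFindFree (PySem.Dict.values d) (PySem.List.pyRange 0 (pvSpecial.length : Int) 1) with
    | some c => d.insert pixelRGB c
    | none => d

def create_colors_dict (pixelRGBHEXlist : List String) : List (String × String) :=
  (pixelRGBHEXlist.foldl pvStepA PySem.Dict.empty).items

-- ===== PORT B =====
-- the special_char tuple of B (Source B repeats the literal)
def pvSpecialB : List String :=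
  ["&", "{", "#", "(", "[", "-", "|", "`", "_", "@", ")", "]", "=", "+", "}", "$", "*"]

-- Source B's loop: 'chars = iter(special_char); for pixelRGB in …: if pixelRGB not in color_dict:
--   c = next(chars, None); if c is None: break; color_dict[pixelRGB] = c'
-- state: remaining iterator contents `chars`, the dict as an insertion-order assoc list `acc`
def pvGoB : List String → List String → List (String × String) → List (String × String)
  | [], _, acc => acc
  | p :: rest, chars, acc =>
      if acc.any (fun kv => kv.1 == p) then pvGoB rest chars acc
      else
        match chars with
        | [] => acc                                   -- next() exhausted: break
        | c :: cs => pvGoB rest cs (acc ++ [(p, c)])  -- new key appended at the end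

def create_colors_dict_alt (pixelRGBHEXlist : List String) : List (String × String) :=
  pvGoB pixelRGBHEXlist pvSpecialB []

-- ===== PRECONDITION & SPEC =====
def Spec_create_colors_dict (pixelRGBHEXlist : List String) (out : List (String × String)) : Prop := out = create_colors_dict_alt pixelRGBHEXlist
instance (pixelRGBHEXlist : List String) (out : List (String × String)) : Decidable (Spec_create_colors_dict pixelRGBHEXlist out) := by unfold Spec_create_colors_dict; infer_instance

-- ===== CLAIM (what is proved, stated in full; the proofs are below) =====
def Claim_equal_create_colors_dict : Prop := ∀ (pixelRGBHEXlist : List String), Dom_create_colors_dict pixelRGBHEXlist → Spec_create_colors_dict pixelRGBHEXlist (create_colors_dict pixelRGBHEXlist)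

-- ===== LEMMAS AND PROOFS =====

lemma pv_map_snd_zip {α β : Type} (l₁ : List α) (l₂ : List β) :
    (l₁.zip l₂).map Prod.snd = l₂.take l₁.length := by
  induction l₁ generalizing l₂ with
  | nil => simp
  | cons a t ih => cases l₂ with
    | nil => simp
    | cons b t₂ => simp [ih]

lemma pv_map_fst_zip {α β : Type} (l₁ : List α) (l₂ : List β) :
    (l₁.zip l₂).map Prod.fst = l₁.take l₂.length := by
  induction l₁ generalizing l₂ with
  | nil => simp
  | cons a t ih => cases l₂ with
    | nil => simp
    | cons b t₂ => simp [ih]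

lemma pv_zip_take {α β : Type} (l₁ : List α) (l₂ : List β) :
    l₁.zip l₂ = (l₁.take l₂.length).zip l₂ := by
  induction l₁ generalizing l₂ with
  | nil => simp
  | cons a t ih => cases l₂ with
    | nil => simp
    | cons b t₂ => simpa using ih t₂

lemma pv_zip_append_singleton {α β : Type} (l₁ : List α) (x : α) (l₂ : List β) :
    (l₁ ++ [x]).zip l₂ = l₁.zip l₂ ++ [x].zip (l₂.drop l₁.length) := by
  induction l₁ generalizing l₂ with
  | nil => simp
  | cons a t ih => cases l₂ with
    | nil => simp
    | cons b t₂ => simp [ih]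

-- the inner scan over values = pvSpecial.take k yields the (k+1)-st special character (none past the end)
lemma pv_find_spec : ∀ k < 18,
    pvFindFree (pvSpecial.take k) (PySem.List.pyRange 0 (pvSpecial.length : Int) 1) = pvSpecial[k]? := by
  decide

-- A's loop keeps color_dict = (distinct colors seen so far).zip special_char
lemma pv_loop_inv (xs : List String) : ∀ (u : List String),
    xs.foldl pvStepA (PySem.Dict.mk (u.zip pvSpecial))
      = PySem.Dict.mk ((xs.foldl PySem.Set.add u).zip pvSpecial) := by
  induction xs with
  | nil => intro u; rfl
  | cons x t ih =>
    intro u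
    have hstep : pvStepA (PySem.Dict.mk (u.zip pvSpecial)) x
        = PySem.Dict.mk ((PySem.Set.add u x).zip pvSpecial) := by
      have hlen17 : pvSpecial.length = 17 := rfl
      have hkeys : (PySem.Dict.mk (u.zip pvSpecial)).keys = u.take 17 := by
        have := pv_map_fst_zip u pvSpecial
        simpa [PySem.Dict.keys, hlen17] using this
      have hvals : (PySem.Dict.mk (u.zip pvSpecial)).values = pvSpecial.take u.length := by
        simpa [PySem.Dict.values] using pv_map_snd_zip u pvSpecial
      by_cases hx : x ∈ u.take 17
      · have hc : (PySem.Dict.mk (u.zip pvSpecial)).contains x = true := by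
          rw [PySem.Dict.contains_iff_mem_keys, hkeys]; exact hx
        have hxu : x ∈ u := List.mem_of_mem_take hx
        have hadd : PySem.Set.add u x = u := by simp [PySem.Set.add, hxu]
        simp [pvStepA, hc, hadd]
      · have hc : (PySem.Dict.mk (u.zip pvSpecial)).contains x = false := by
          rw [Bool.eq_false_iff]
          intro h
          exact hx (hkeys ▸ (PySem.Dict.contains_iff_mem_keys _ _).mp h)
        by_cases hlen : u.length < 17
        · -- a free character remains: A inserts it
          have hxu : x ∉ u := by
            intro hm; exact hx (by simpa [List.take_of_length_le (le_of_lt hlen)] using hm)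
          have hfind := pv_find_spec u.length (by omega)
          have hget : pvSpecial[u.length]? = some (pvSpecial[u.length]'(by omega)) :=
            List.getElem?_eq_getElem (by omega)
          have hadd : PySem.Set.add u x = u ++ [x] := by simp [PySem.Set.add, hxu]
          have hdrop : pvSpecial.drop u.length
              = pvSpecial[u.length]'(by omega) :: pvSpecial.drop (u.length + 1) :=
            List.drop_eq_getElem_cons (by omega)
          have hstep1 : pvStepA (PySem.Dict.mk (u.zip pvSpecial)) x
              = (PySem.Dict.mk (u.zip pvSpecial)).insert x (pvSpecial[u.length]'(by omega)) := by
            rw [pvStepA]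
            simp only [hc, Bool.false_eq_true, if_false, hvals, hfind, hget]
          rw [hstep1, hadd]
          apply PySem.Dict.ext
          rw [PySem.Dict.items_insert_of_not_contains _ _ hc]
          rw [pv_zip_append_singleton u x pvSpecial, hdrop]
          rfl
        · -- all 17 characters used: A leaves the dict unchanged
          have h17 : 17 ≤ u.length := by omega
          have hvals' : (PySem.Dict.mk (u.zip pvSpecial)).values = pvSpecial := by
            rw [hvals, List.take_of_length_le (by omega)]
          have hnone : pvSpecial[(17:Nat)]? = none := rfl
          have hfind' : pvFindFree ((PySem.Dict.mk (u.zip pvSpecial)).values)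
              (PySem.List.pyRange 0 (pvSpecial.length : Int) 1) = none := by
            rw [hvals']
            have := pv_find_spec 17 (by omega)
            rw [List.take_of_length_le (by omega)] at this
            rw [this, hnone]
          have hzip : (PySem.Set.add u x).zip pvSpecial = u.zip pvSpecial := by
            rw [pv_zip_take (PySem.Set.add u x) pvSpecial, pv_zip_take u pvSpecial]
            by_cases hxu : x ∈ u
            · simp [PySem.Set.add, hxu]
            · have hadd : PySem.Set.add u x = u ++ [x] := by simp [PySem.Set.add, hxu]
              rw [hadd, hlen17, List.take_append_of_le_length h17]
          rw [pvStepA]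
          simp only [hc, Bool.false_eq_true, if_false, hfind', hzip]
    rw [List.foldl_cons, List.foldl_cons, hstep, ih]

lemma pvSpecialB_eq : pvSpecialB = pvSpecial := rfl

lemma pv_foldl_add_prefix : ∀ (xs u : List String), ∃ v, xs.foldl PySem.Set.add u = u ++ v := by
  intro xs
  induction xs with
  | nil => intro u; exact ⟨[], by simp⟩
  | cons x t ih =>
    intro u
    by_cases hx : x ∈ u
    · have : PySem.Set.add u x = u := by simp [PySem.Set.add, hx]
      simpa [List.foldl_cons, this] using ih u
    · have hadd : PySem.Set.add u x = u ++ [x] := by simp [PySem.Set.add, hx]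
      obtain ⟨v, hv⟩ := ih (u ++ [x])
      exact ⟨x :: v, by simp [List.foldl_cons, hadd, hv]⟩

-- membership test through acc = u.zip special
lemma pv_any_fst_zip (u : List String) (x : String) :
    ((u.zip pvSpecialB).any (fun kv => kv.1 == x)) = true ↔ x ∈ u.take 17 := by
  have h17 : pvSpecialB.length = 17 := rfl
  rw [show (u.take 17) = (u.zip pvSpecialB).map Prod.fst from by rw [pv_map_fst_zip, h17]]
  simp [List.any_eq_true, List.mem_map, beq_iff_eq]

-- B's loop keeps the same invariant, consuming the iterator position u.length
lemma pvB_inv : ∀ (xs u : List String), u.length ≤ 17 →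
    pvGoB xs (pvSpecialB.drop u.length) (u.zip pvSpecialB)
      = (xs.foldl PySem.Set.add u).zip pvSpecialB := by
  intro xs
  induction xs with
  | nil => intro u _; rfl
  | cons x t ih =>
    intro u hu
    have htake : u.take 17 = u := List.take_of_length_le hu
    rw [show pvGoB (x :: t) (pvSpecialB.drop u.length) (u.zip pvSpecialB)
        = if (u.zip pvSpecialB).any (fun kv => kv.1 == x) then
            pvGoB t (pvSpecialB.drop u.length) (u.zip pvSpecialB)
          else
            match pvSpecialB.drop u.length with
            | [] => u.zip pvSpecialB
            | c :: cs => pvGoB t cs (u.zip pvSpecialB ++ [(x, c)]) from rfl]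
    by_cases hx : x ∈ u
    · have hany : ((u.zip pvSpecialB).any (fun kv => kv.1 == x)) = true :=
        (pv_any_fst_zip u x).mpr (by rw [htake]; exact hx)
      have hadd : PySem.Set.add u x = u := by simp [PySem.Set.add, hx]
      rw [hany, if_pos rfl, List.foldl_cons, hadd, ih u hu]
    · have hany : ((u.zip pvSpecialB).any (fun kv => kv.1 == x)) = false := by
        rw [Bool.eq_false_iff]; intro h
        have := (pv_any_fst_zip u x).mp h
        rw [htake] at this
        exact hx this
      rw [hany]
      simp only [Bool.false_eq_true, if_false]
      by_cases hlen : u.length < 17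
      · -- a character remains in the iterator
        have hBlen : pvSpecialB.length = 17 := rfl
        have hdrop : pvSpecialB.drop u.length
            = pvSpecialB[u.length]'(by rw [hBlen]; omega) :: pvSpecialB.drop (u.length + 1) :=
          List.drop_eq_getElem_cons (by rw [hBlen]; omega)
        have hadd : PySem.Set.add u x = u ++ [x] := by simp [PySem.Set.add, hx]
        have hacc : (u.zip pvSpecialB) ++ [(x, pvSpecialB[u.length]'(by rw [hBlen]; omega))]
            = (u ++ [x]).zip pvSpecialB := by
          rw [pv_zip_append_singleton u x pvSpecialB, hdrop]; rfl
        rw [hdrop]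
        rw [show (match pvSpecialB[u.length]'(by rw [hBlen]; omega) :: pvSpecialB.drop (u.length + 1) with
            | [] => u.zip pvSpecialB
            | c :: cs => pvGoB t cs (u.zip pvSpecialB ++ [(x, c)]))
            = pvGoB t (pvSpecialB.drop (u.length + 1))
                (u.zip pvSpecialB ++ [(x, pvSpecialB[u.length]'(by rw [hBlen]; omega))]) from rfl]
        rw [hacc]
        have := ih (u ++ [x]) (by simp; omega)
        simp only [List.length_append, List.length_cons, List.length_nil,
          Nat.zero_add] at this ⊢
        rw [this, List.foldl_cons, hadd]
      · -- iterator exhausted: B breaks, A's dedup keeps growing but the zip truncates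
        have h17 : u.length = 17 := by omega
        have hdropnil : pvSpecialB.drop u.length = [] := by
          rw [h17]; rfl
        rw [hdropnil]
        have hadd : PySem.Set.add u x = u ++ [x] := by simp [PySem.Set.add, hx]
        obtain ⟨v, hv⟩ := pv_foldl_add_prefix t (u ++ [x])
        rw [List.foldl_cons, hadd, hv]
        rw [pv_zip_take (u ++ [x] ++ v) pvSpecialB, pv_zip_take u pvSpecialB]
        have hBlen : pvSpecialB.length = 17 := rfl
        rw [hBlen, List.append_assoc, List.take_append_of_le_length (by omega), htake]

-- ===== VERDICT (by name: the statement is the Claim_ definition above) =====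
theorem create_colors_dict_spec : Claim_equal_create_colors_dict := by
  intro xs _
  show create_colors_dict xs = create_colors_dict_alt xs
  have h0 : PySem.Dict.empty = PySem.Dict.mk (([] : List String).zip pvSpecial) := rfl
  have hb := pvB_inv xs [] (by simp)
  rw [create_colors_dict, h0, pv_loop_inv xs [], create_colors_dict_alt]
  simp only [List.length_nil, List.drop_zero, List.zip_nil_left] at hb
  rw [hb, pvSpecialB_eq]
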